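-- pv_equiv track=rewrite | github.com/MaxouGJ/EA4 | TP/2015-04-07 TP4.py | affichagePrefixe
-- ===== SOURCE A (Python) =====
-- def affichagePrefixe(A):
--     res = ""
--     n = 0
--     while n > -1:
--         res += str(A[n][0])
--         if A[n][1] == -1:
--             if A[n][2] == -1:
--                 while (A[A[n][3]][1] == n and A[A[n][3]][2] == -1) or A[A[n][3]][2] == n:
--                     n = A[n][3]
--                 n = A[A[n][3]][2]
--             else :
--                 n = A[n][2]
--         else :
--             n = A[n][1]
--     return res
-- ===== SOURCE B (Python) =====
-- def affichagePrefixe(A):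
--     res = ""
--     stack = [(False, 0)]
--     while stack:
--         resume, n = stack.pop()
--         if resume:
--             r = A[n][2]
--             if r != -1:
--                 stack.append((False, r))
--             continue
--         if n < 0:
--             break
--         res += str(A[n][0])
--         l = A[n][1]
--         if l != -1:
--             stack.append((True, n))
--             stack.append((False, l))
--         else:
--             r = A[n][2]
--             if r != -1:
--                 stack.append((False, r))
--     return res
-- ===== Notes on version B (the rewrite author's own statement) =====
-- stated objective: alternative
-- what changed: Replaces A's parent-pointer climbing (walking back up the ancestor chain to find the next preorder node) with an explicit stack of pending nodes plus deferred right-child markers; B never reads a parent pointer, and like A it stops when the walk reaches a negative (non-node) index.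
-- outside the precondition, e.g. on affichagePrefixe([[1, -1, -1, 1], [2, 0, 2, -1], [9, -1, -1, -1]]): A returns '19', B returns '1'; on affichagePrefixe([[1, 2, -1, -1], [3, -1, -1, 2], [2, 1, -1, 0]]): A returns '123', B returns '123'; on affichagePrefixe([[2, 2, 1, -1], [0, -1, -1, 0], [1, -1, -1, 2], [-3, 0]]): A returns '21', B returns '210'
import Mathlib
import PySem

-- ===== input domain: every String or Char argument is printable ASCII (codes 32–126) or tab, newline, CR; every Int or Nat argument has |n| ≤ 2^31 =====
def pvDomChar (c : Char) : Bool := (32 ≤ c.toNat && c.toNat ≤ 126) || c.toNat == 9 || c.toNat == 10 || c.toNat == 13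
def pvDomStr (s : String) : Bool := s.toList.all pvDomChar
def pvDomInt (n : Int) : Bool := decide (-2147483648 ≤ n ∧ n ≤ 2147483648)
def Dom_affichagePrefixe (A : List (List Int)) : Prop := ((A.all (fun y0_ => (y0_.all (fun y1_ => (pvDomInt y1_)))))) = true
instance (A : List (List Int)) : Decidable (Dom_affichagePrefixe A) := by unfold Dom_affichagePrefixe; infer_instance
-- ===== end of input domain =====

-- B replaces A's parent-pointer climbing with an explicit stack of pending subtrees (simpler, one child-following pass).

-- ===== PORT A =====
-- A[n][i] with Python indexing semantics (none = IndexError)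
def pvAt (A : List (List Int)) (n i : Int) : Option Int :=
  (PySem.List.pyGet? A n).bind (fun row => PySem.List.pyGet? row i)

-- inner while loop of A: climbs while the current node is the last child of its parent,
-- then returns A[A[n][3]][2]; fuel bounds the iterations (none = exception / fuel exhausted,
-- unreachable under Pre_)
def pvClimbA (A : List (List Int)) : Nat → Int → Option Int
  | 0, _ => none
  | f + 1, n =>
    (pvAt A n 3).bind fun p =>
    (pvAt A p 1).bind fun l =>
    (pvAt A p 2).bind fun r =>
    if (l == n && r == -1) || r == n then pvClimbA A f p else some r

-- outer while loop of A
def pvOuterA (A : List (List Int)) : Nat → Int → String → Option String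
  | 0, _, _ => none
  | f + 1, n, res =>
    if n > -1 then
      (pvAt A n 0).bind fun v =>
      let res := res ++ PySem.Int.toStr v
      (pvAt A n 1).bind fun l =>
      if l == -1 then
        (pvAt A n 2).bind fun r =>
        if r == -1 then
          (pvClimbA A (A.length + 1) n).bind fun n' => pvOuterA A f n' res
        else pvOuterA A f r res
      else pvOuterA A f l res
    else some res

def affichagePrefixe (A : List (List Int)) : String :=
  (pvOuterA A (2 ^ A.length + 1) 0 "").getD ""

-- ===== PORT B =====
-- stack walk of Source B: pop an entry; a resume marker (true, n) fetches n's right child,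
-- a plain entry (false, n) is visited (a negative n ends the walk, like A's `while n > -1`)
def pvOuterB (A : List (List Int)) : Nat → List (Bool × Int) → String → Option String
  | _, [], res => some res
  | 0, _ :: _, _ => none
  | f + 1, (resume, n) :: st, res =>
    if resume then
      (pvAt A n 2).bind fun r =>
      pvOuterB A f (if r != -1 then (false, r) :: st else st) res
    else
      if n < 0 then some res
      else
        (pvAt A n 0).bind fun v =>
        let res := res ++ PySem.Int.toStr v
        (pvAt A n 1).bind fun l =>
        if l != -1 then
          pvOuterB A f ((false, l) :: (true, n) :: st) res
        else
          (pvAt A n 2).bind fun r =>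
          pvOuterB A f (if r != -1 then (false, r) :: st else st) res

def affichagePrefixe_alt (A : List (List Int)) : String :=
  (pvOuterB A (2 ^ (A.length + 1) + 1) [(false, 0)] "").getD ""

-- ===== PRECONDITION & SPEC =====
def pvCell (A : List (List Int)) (i j : Nat) : Int := (A.getD i []).getD j 0

-- pvWf: well-formed array-encoded binary trees [value, left, right, parent] rooted at 0,
-- parents stored before their children (the standard encoding this exercise builds)
def pvWf (A : List (List Int)) : Prop :=
  A ≠ [] ∧
  ∀ i : Nat, i < A.length →
    4 ≤ (A.getD i []).length ∧
    (pvCell A i 1 = -1 ∨ ((i : Int) < pvCell A i 1 ∧ pvCell A i 1 < (A.length : Int) ∧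
        pvCell A (pvCell A i 1).toNat 3 = (i : Int))) ∧
    (pvCell A i 2 = -1 ∨ ((i : Int) < pvCell A i 2 ∧ pvCell A i 2 < (A.length : Int) ∧
        pvCell A (pvCell A i 2).toNat 3 = (i : Int))) ∧
    (pvCell A i 1 = pvCell A i 2 → pvCell A i 1 = -1) ∧
    (i = 0 → pvCell A i 3 = -1) ∧
    (i ≠ 0 → 0 ≤ pvCell A i 3 ∧ pvCell A i 3 < (i : Int))

-- pvQ: row 0's parent pointer as a Python index (negative wraps to the end)
def pvQ (A : List (List Int)) : Nat :=
  (if pvCell A 0 3 < 0 then pvCell A 0 3 + (A.length : Int) else pvCell A 0 3).toNat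

-- pvTriv: the degenerate returning family — the root is a leaf and its (possibly wrapped)
-- parent pointer ends the climb at once, so both programs print only the root
def pvTriv (A : List (List Int)) : Prop :=
  A ≠ [] ∧ 4 ≤ (A.getD 0 []).length ∧ pvCell A 0 1 = -1 ∧ pvCell A 0 2 = -1 ∧
  -(A.length : Int) ≤ pvCell A 0 3 ∧ pvCell A 0 3 < (A.length : Int) ∧
  3 ≤ (A.getD (pvQ A) []).length ∧ pvCell A (pvQ A) 1 ≠ 0 ∧ pvCell A (pvQ A) 2 = -1

-- pvDie: the other common returning family — row 0's own left (or only right) pointer is a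
-- negative non-sentinel, so both programs print the root and stop there
def pvDie (A : List (List Int)) : Prop :=
  A ≠ [] ∧ ((2 ≤ (A.getD 0 []).length ∧ pvCell A 0 1 < -1) ∨
            (3 ≤ (A.getD 0 []).length ∧ pvCell A 0 1 = -1 ∧ pvCell A 0 2 < -1))

-- Pre_ = well-formed trees (pvWf) plus the degenerate returning families (pvTriv, pvDie).
-- Outside it A may raise IndexError or loop forever, and on other malformed terminating inputs
-- A's ancestor climb visits nodes B's child-driven walk does not (or vice versa); the
-- parent-before-child ordering in pvWf also excludes some reordered arrays on which both agree
-- (see the cites).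
def Pre_affichagePrefixe (A : List (List Int)) : Prop := pvWf A ∨ pvTriv A ∨ pvDie A

instance (A : List (List Int)) : Decidable (Pre_affichagePrefixe A) := by
  unfold Pre_affichagePrefixe pvWf pvTriv pvQ pvDie; infer_instance

def pvWitness_affichagePrefixe : List (List Int) :=
  [[1, 1, 2, -1], [2, -1, -1, 0], [3, -1, -1, 0]]

def Spec_affichagePrefixe (A : List (List Int)) (out : String) : Prop := out = affichagePrefixe_alt A
instance (A : List (List Int)) (out : String) : Decidable (Spec_affichagePrefixe A out) := by unfold Spec_affichagePrefixe; infer_instance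

-- ===== CLAIM (what is proved, stated in full; the proofs are below) =====
def Claim_equal_affichagePrefixe : Prop := ∀ (A : List (List Int)), Dom_affichagePrefixe A → Pre_affichagePrefixe A → Spec_affichagePrefixe A (affichagePrefixe A)

-- ===== LEMMAS AND PROOFS =====

-- the preorder node list of the subtree rooted at n (spec only; guards make it total)
def pvPre (A : List (List Int)) (n : Nat) : List Int :=
  (n : Int) ::
    ((if _h : (n : Int) < pvCell A n 1 ∧ pvCell A n 1 < (A.length : Int) then
        pvPre A (pvCell A n 1).toNat else []) ++
     (if _h : (n : Int) < pvCell A n 2 ∧ pvCell A n 2 < (A.length : Int) then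
        pvPre A (pvCell A n 2).toNat else []))
  termination_by A.length - n
  decreasing_by all_goals omega

def pvStr (A : List (List Int)) : List Int → String
  | [] => ""
  | i :: t => PySem.Int.toStr (pvCell A i.toNat 0) ++ pvStr A t

-- ---- basic access lemmas ----

theorem pvAt_nat (A : List (List Int)) (n j : Nat) (hn : n < A.length)
    (hj : j < (A.getD n []).length) :
    pvAt A (n : Int) (j : Int) = some (pvCell A n j) := by
  unfold pvAt pvCell
  rw [PySem.List.pyGet?_natCast]
  rw [List.getElem?_eq_getElem hn]
  simp only [Option.bind_some, PySem.List.pyGet?_natCast]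
  have hrow : A.getD n [] = A[n] := List.getD_eq_getElem _ _ hn
  have hj' : j < A[n].length := by rw [← hrow]; omega
  rw [List.getD_eq_getElem _ _ hn]
  rw [List.getElem?_eq_getElem hj', List.getD_eq_getElem _ _ hj']

theorem pvAt_neg_one (A : List (List Int)) (j : Nat) (hne : A ≠ [])
    (hj : j < (A.getD (A.length - 1) []).length) :
    pvAt A (-1) (j : Int) = some (pvCell A (A.length - 1) j) := by
  have hlen : 0 < A.length := List.length_pos_iff.mpr hne
  unfold pvAt pvCell
  rw [PySem.List.pyGet?_neg_one]
  have hlast : A.getLast? = some (A.getD (A.length - 1) []) := by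
    rw [List.getLast?_eq_getElem?, List.getElem?_eq_getElem (by omega : A.length - 1 < A.length),
        List.getD_eq_getElem _ _ (by omega : A.length - 1 < A.length)]
  rw [hlast]
  simp only [Option.bind_some, PySem.List.pyGet?_natCast]
  have hrow : A.getD (A.length - 1) [] = A[A.length - 1] := List.getD_eq_getElem _ _ (by omega)
  have hj' : j < A[A.length - 1].length := by rw [← hrow]; omega
  rw [List.getD_eq_getElem _ _ (by omega : A.length - 1 < A.length)]
  rw [List.getElem?_eq_getElem hj', List.getD_eq_getElem _ _ hj']

-- ---- facts from the precondition ----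

theorem pv_row4 (A : List (List Int)) (hP : pvWf A) (n : Nat) (hn : n < A.length) :
    4 ≤ (A.getD n []).length := (hP.2 n hn).1

theorem pv_last_leaf (A : List (List Int)) (hP : pvWf A) :
    pvCell A (A.length - 1) 1 = -1 ∧ pvCell A (A.length - 1) 2 = -1 := by
  have hlen : 0 < A.length := List.length_pos_iff.mpr hP.1
  obtain ⟨-, h1, h2, -⟩ := hP.2 (A.length - 1) (by omega)
  constructor
  · rcases h1 with h | ⟨ha, hb, -⟩
    · exact h
    · exfalso; omega
  · rcases h2 with h | ⟨ha, hb, -⟩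
    · exact h
    · exfalso; omega

theorem pvAt0 (A : List (List Int)) (n : Nat) (hn : n < A.length) (hP : pvWf A) :
    pvAt A (n : Int) 0 = some (pvCell A n 0) := by
  simpa using pvAt_nat A n 0 hn (by have := pv_row4 A hP n hn; omega)

theorem pvAt1 (A : List (List Int)) (n : Nat) (hn : n < A.length) (hP : pvWf A) :
    pvAt A (n : Int) 1 = some (pvCell A n 1) := by
  simpa using pvAt_nat A n 1 hn (by have := pv_row4 A hP n hn; omega)

theorem pvAt2 (A : List (List Int)) (n : Nat) (hn : n < A.length) (hP : pvWf A) :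
    pvAt A (n : Int) 2 = some (pvCell A n 2) := by
  simpa using pvAt_nat A n 2 hn (by have := pv_row4 A hP n hn; omega)

theorem pvAt3 (A : List (List Int)) (n : Nat) (hn : n < A.length) (hP : pvWf A) :
    pvAt A (n : Int) 3 = some (pvCell A n 3) := by
  simpa using pvAt_nat A n 3 hn (by have := pv_row4 A hP n hn; omega)

-- ---- climb lemmas ----

theorem climb_at (A : List (List Int)) (hP : pvWf A) (m q : Nat)
    (hm : m < A.length) (hq : q < A.length) (hpar : pvCell A m 3 = (q : Int)) (f : Nat) :
    pvClimbA A (f + 1) (m : Int) =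
      if (pvCell A q 1 == (m : Int) && pvCell A q 2 == -1) || pvCell A q 2 == (m : Int)
      then pvClimbA A f (q : Int) else some (pvCell A q 2) := by
  simp only [pvClimbA]
  rw [pvAt3 A m hm hP, hpar]
  simp only [Option.bind_some]
  rw [pvAt1 A q hq hP, pvAt2 A q hq hP]
  simp only [Option.bind_some]

theorem climb_root (A : List (List Int)) (hP : pvWf A) (f : Nat) :
    pvClimbA A (f + 1) (0 : Int) = some (-1) := by
  have hlen : 0 < A.length := List.length_pos_iff.mpr hP.1
  have hroot : pvCell A 0 3 = -1 := (hP.2 0 hlen).2.2.2.2.1 rfl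
  have h03 : pvAt A 0 3 = some (pvCell A 0 3) := by
    simpa using pvAt3 A 0 hlen hP
  have hl : pvAt A (-1) 1 = some (pvCell A (A.length - 1) 1) := by
    simpa using pvAt_neg_one A 1 hP.1 (by have := pv_row4 A hP (A.length - 1) (by omega); omega)
  have hr : pvAt A (-1) 2 = some (pvCell A (A.length - 1) 2) := by
    simpa using pvAt_neg_one A 2 hP.1 (by have := pv_row4 A hP (A.length - 1) (by omega); omega)
  obtain ⟨hL, hR⟩ := pv_last_leaf A hP
  simp only [pvClimbA]
  rw [h03, hroot]
  simp only [Option.bind_some]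
  rw [hl, hr]
  simp only [Option.bind_some, hL, hR]
  norm_num

theorem climb_fuel (A : List (List Int)) (hP : pvWf A) :
    ∀ m : Nat, m < A.length → ∀ k, pvClimbA A (m + 2 + k) (m : Int) = pvClimbA A (m + 2) (m : Int) := by
  intro m
  induction m using Nat.strong_induction_on with
  | _ m IH =>
    intro hm k
    by_cases h0 : m = 0
    · subst h0
      have e1 : 0 + 2 + k = (1 + k) + 1 := by omega
      rw [e1]
      simp only [Nat.cast_zero]
      rw [climb_root A hP (1 + k), climb_root A hP 1]
    · obtain ⟨hge, hlt⟩ := (hP.2 m hm).2.2.2.2.2 h0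
      have hq0 : 0 ≤ pvCell A m 3 := hge
      set q : Nat := (pvCell A m 3).toNat with hqdef
      have hqm : q < m := by omega
      have hpar : pvCell A m 3 = (q : Int) := by omega
      have hq' : q < A.length := by omega
      have e1 : m + 2 + k = (m + 1 + k) + 1 := by omega
      have e2 : m + 2 = (m + 1) + 1 := by omega
      rw [e1, climb_at A hP m q hm hq' hpar, e2, climb_at A hP m q hm hq' hpar]
      by_cases hc : ((pvCell A q 1 == (m : Int) && pvCell A q 2 == -1) || pvCell A q 2 == (m : Int)) = true
      · rw [if_pos hc, if_pos hc]
        have e3 : m + 1 + k = q + 2 + (m - 1 - q + k) := by omega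
        have e4 : m + 1 = q + 2 + (m - 1 - q) := by omega
        rw [e3, e4, IH q hqm hq' _, IH q hqm hq' _]
      · rw [if_neg hc, if_neg hc]

theorem climb_big (A : List (List Int)) (hP : pvWf A) (m : Nat) (hm : m < A.length) :
    pvClimbA A (A.length + 1) (m : Int) = pvClimbA A (m + 2) (m : Int) := by
  have e : A.length + 1 = m + 2 + (A.length - 1 - m) := by omega
  rw [e, climb_fuel A hP m hm _]

-- ---- children / preorder lemmas ----

theorem childL (A : List (List Int)) (hP : pvWf A) (n : Nat) (hn : n < A.length)
    (h : pvCell A n 1 ≠ -1) :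
    (n : Int) < pvCell A n 1 ∧ pvCell A n 1 < (A.length : Int) ∧
      pvCell A (pvCell A n 1).toNat 3 = (n : Int) := by
  rcases (hP.2 n hn).2.1 with h' | h'
  · exact absurd h' h
  · exact h'

theorem childR (A : List (List Int)) (hP : pvWf A) (n : Nat) (hn : n < A.length)
    (h : pvCell A n 2 ≠ -1) :
    (n : Int) < pvCell A n 2 ∧ pvCell A n 2 < (A.length : Int) ∧
      pvCell A (pvCell A n 2).toNat 3 = (n : Int) := by
  rcases (hP.2 n hn).2.2.1 with h' | h'
  · exact absurd h' h
  · exact h'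

theorem childNe (A : List (List Int)) (hP : pvWf A) (n : Nat) (hn : n < A.length) :
    pvCell A n 1 = pvCell A n 2 → pvCell A n 1 = -1 := (hP.2 n hn).2.2.2.1

theorem pre_unfold (A : List (List Int)) (hP : pvWf A) (n : Nat) (hn : n < A.length) :
    pvPre A n = (n : Int) ::
      ((if pvCell A n 1 = -1 then [] else pvPre A (pvCell A n 1).toNat) ++
       (if pvCell A n 2 = -1 then [] else pvPre A (pvCell A n 2).toNat)) := by
  rw [pvPre]
  congr 1
  congr 1
  · by_cases h : pvCell A n 1 = -1
    · rw [if_pos h, dif_neg]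
      intro hc
      omega
    · obtain ⟨h1, h2, -⟩ := childL A hP n hn h
      rw [if_neg h, dif_pos ⟨h1, h2⟩]
  · by_cases h : pvCell A n 2 = -1
    · rw [if_pos h, dif_neg]
      intro hc
      omega
    · obtain ⟨h1, h2, -⟩ := childR A hP n hn h
      rw [if_neg h, dif_pos ⟨h1, h2⟩]

theorem pvStr_append (A : List (List Int)) (x y : List Int) :
    pvStr A (x ++ y) = pvStr A x ++ pvStr A y := by
  induction x with
  | nil => simp [pvStr, String.empty_append]
  | cons a t ih => simp [pvStr, ih, String.append_assoc]

theorem pre_len (A : List (List Int)) (hP : pvWf A) :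
    ∀ d n, n < A.length → A.length - n ≤ d → (pvPre A n).length + 1 ≤ 2 ^ (A.length - n) := by
  intro d
  induction d with
  | zero => intro n hn hd; omega
  | succ d ih =>
    intro n hn hd
    rw [pre_unfold A hP n hn]
    set PL := (if pvCell A n 1 = -1 then ([] : List Int) else pvPre A (pvCell A n 1).toNat) with hPL
    set PR := (if pvCell A n 2 = -1 then ([] : List Int) else pvPre A (pvCell A n 2).toNat) with hPR
    simp only [List.length_cons, List.length_append]
    set E := 2 ^ (A.length - n - 1) with hE
    have hEpos : 1 ≤ E := Nat.one_le_two_pow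
    have h2 : 2 ^ (A.length - n) = E * 2 := by
      rw [show A.length - n = (A.length - n - 1) + 1 by omega, pow_succ]
    have hLa : PL.length + 1 ≤ E := by
      rw [hPL]
      by_cases h : pvCell A n 1 = -1
      · simp [h]; omega
      · obtain ⟨h1, h2', -⟩ := childL A hP n hn h
        rw [if_neg h]
        have hc2 : (pvCell A n 1).toNat < A.length := by omega
        calc (pvPre A (pvCell A n 1).toNat).length + 1
            ≤ 2 ^ (A.length - (pvCell A n 1).toNat) := ih _ hc2 (by omega)
          _ ≤ E := Nat.pow_le_pow_right (by norm_num) (by omega)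
    have hLb : PR.length + 1 ≤ E := by
      rw [hPR]
      by_cases h : pvCell A n 2 = -1
      · simp [h]; omega
      · obtain ⟨h1, h2', -⟩ := childR A hP n hn h
        rw [if_neg h]
        have hc2 : (pvCell A n 2).toNat < A.length := by omega
        calc (pvPre A (pvCell A n 2).toNat).length + 1
            ≤ 2 ^ (A.length - (pvCell A n 2).toNat) := ih _ hc2 (by omega)
          _ ≤ E := Nat.pow_le_pow_right (by norm_num) (by omega)
    omega

-- ---- the stack walk consumes exactly the preorder of the popped subtree ----

-- pvCost: number of loop iterations Source B's stack walk spends on the subtree at n (spec only)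
def pvCost (A : List (List Int)) (n : Nat) : Nat :=
  1 + (if _h : (n : Int) < pvCell A n 1 ∧ pvCell A n 1 < (A.length : Int) then
        1 + pvCost A (pvCell A n 1).toNat +
          (if _h2 : (n : Int) < pvCell A n 2 ∧ pvCell A n 2 < (A.length : Int) then
            pvCost A (pvCell A n 2).toNat else 0)
      else
        (if _h2 : (n : Int) < pvCell A n 2 ∧ pvCell A n 2 < (A.length : Int) then
          pvCost A (pvCell A n 2).toNat else 0))
  termination_by A.length - n
  decreasing_by all_goals omega

theorem cost_unfold (A : List (List Int)) (hP : pvWf A) (n : Nat) (hn : n < A.length) :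
    pvCost A n = 1 + (if pvCell A n 1 = -1 then
        (if pvCell A n 2 = -1 then 0 else pvCost A (pvCell A n 2).toNat)
      else 1 + pvCost A (pvCell A n 1).toNat +
        (if pvCell A n 2 = -1 then 0 else pvCost A (pvCell A n 2).toNat)) := by
  rw [pvCost]
  congr 1
  by_cases hl : pvCell A n 1 = -1 <;> by_cases hr : pvCell A n 2 = -1
  · rw [if_pos hl, if_pos hr, dif_neg (by intro hc; omega), dif_neg (by intro hc; omega)]
  · obtain ⟨h1, h2, -⟩ := childR A hP n hn hr
    rw [if_pos hl, if_neg hr, dif_neg (by intro hc; omega), dif_pos ⟨h1, h2⟩]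
  · obtain ⟨h1, h2, -⟩ := childL A hP n hn hl
    rw [if_neg hl, if_pos hr, dif_pos ⟨h1, h2⟩, dif_neg (by intro hc; omega)]
  · obtain ⟨h1, h2, -⟩ := childL A hP n hn hl
    obtain ⟨h1', h2', -⟩ := childR A hP n hn hr
    rw [if_neg hl, if_neg hr, dif_pos ⟨h1, h2⟩, dif_pos ⟨h1', h2'⟩]

theorem cost_le (A : List (List Int)) (hP : pvWf A) :
    ∀ d n, n < A.length → A.length - n ≤ d → pvCost A n + 2 ≤ 2 ^ (A.length - n + 1) := by
  intro d
  induction d with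
  | zero => intro n hn hd; omega
  | succ d ih =>
    intro n hn hd
    rw [cost_unfold A hP n hn]
    set E := 2 ^ (A.length - n) with hE
    have hEpos : 2 ≤ E := by
      rw [hE, show A.length - n = (A.length - n - 1) + 1 by omega, pow_succ]
      have := Nat.one_le_two_pow (n := A.length - n - 1)
      omega
    have h2 : 2 ^ (A.length - n + 1) = E * 2 := by rw [pow_succ]
    have hcl : pvCell A n 1 ≠ -1 → pvCost A (pvCell A n 1).toNat + 2 ≤ E := by
      intro h
      obtain ⟨h1, h2', -⟩ := childL A hP n hn h
      have hc2 : (pvCell A n 1).toNat < A.length := by omega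
      calc pvCost A (pvCell A n 1).toNat + 2
          ≤ 2 ^ (A.length - (pvCell A n 1).toNat + 1) := ih _ hc2 (by omega)
        _ ≤ E := Nat.pow_le_pow_right (by norm_num) (by omega)
    have hcr : pvCell A n 2 ≠ -1 → pvCost A (pvCell A n 2).toNat + 2 ≤ E := by
      intro h
      obtain ⟨h1, h2', -⟩ := childR A hP n hn h
      have hc2 : (pvCell A n 2).toNat < A.length := by omega
      calc pvCost A (pvCell A n 2).toNat + 2
          ≤ 2 ^ (A.length - (pvCell A n 2).toNat + 1) := ih _ hc2 (by omega)
        _ ≤ E := Nat.pow_le_pow_right (by norm_num) (by omega)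
    by_cases hl : pvCell A n 1 = -1 <;> by_cases hr : pvCell A n 2 = -1
    · simp only [hl, hr, if_pos]; omega
    · have := hcr hr; rw [if_pos hl, if_neg hr]; omega
    · have := hcl hl; rw [if_neg hl, if_pos hr]; omega
    · have h1 := hcl hl; have h2' := hcr hr; rw [if_neg hl, if_neg hr]; omega

theorem outerB_nil (A : List (List Int)) : ∀ (g : Nat) (s : String), pvOuterB A g [] s = some s := by
  intro g s; cases g <;> rfl

-- ---- the stack walk consumes exactly the preorder of the subtree it pops ----

theorem runB (A : List (List Int)) (hP : pvWf A) :
    ∀ d n, n < A.length → A.length - n ≤ d →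
      ∀ (f : Nat) (st : List (Bool × Int)) (res : String),
      pvOuterB A (f + pvCost A n) ((false, (n : Int)) :: st) res =
        pvOuterB A f st (res ++ pvStr A (pvPre A n)) := by
  intro d
  induction d with
  | zero => intro n hn hd; omega
  | succ d ih =>
    intro n hn hd f st res
    rw [pre_unfold A hP n hn, cost_unfold A hP n hn]
    by_cases hl : pvCell A n 1 = -1 <;> by_cases hr : pvCell A n 2 = -1
    · -- leaf
      simp only [hl, hr, reduceIte, List.append_nil]
      rw [show f + (1 + 0) = f + 1 by omega]
      simp only [pvOuterB, Bool.false_eq_true, if_false]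
      rw [if_neg (by omega : ¬((n : Int) < 0))]
      rw [pvAt0 A n hn hP]
      simp only [Option.bind_some]
      rw [pvAt1 A n hn hP]
      simp only [Option.bind_some, hl, bne_self_eq_false, Bool.false_eq_true, if_false]
      rw [pvAt2 A n hn hP]
      simp only [Option.bind_some, hr, bne_self_eq_false, Bool.false_eq_true, if_false]
      simp [pvStr]
    · -- left absent, right child
      obtain ⟨hc1, hc2, -⟩ := childR A hP n hn hr
      set cr : Nat := (pvCell A n 2).toNat with hcrdef
      have hcr : pvCell A n 2 = (cr : Int) := by omega
      have hcrlen : cr < A.length := by omega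
      simp only [hl, reduceIte, List.nil_append]
      rw [if_neg hr, if_neg hr]
      rw [show f + (1 + pvCost A cr) = (f + pvCost A cr) + 1 by omega]
      simp only [pvOuterB, Bool.false_eq_true, if_false]
      rw [if_neg (by omega : ¬((n : Int) < 0))]
      rw [pvAt0 A n hn hP]
      simp only [Option.bind_some]
      rw [pvAt1 A n hn hP]
      simp only [Option.bind_some, hl, bne_self_eq_false, Bool.false_eq_true, if_false]
      rw [pvAt2 A n hn hP]
      simp only [Option.bind_some]
      rw [if_pos (bne_iff_ne.mpr hr)]
      rw [hcr, ih cr hcrlen (by omega) f st _]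
      simp [pvStr, String.append_assoc]
    · -- left child, right absent
      obtain ⟨hc1, hc2, -⟩ := childL A hP n hn hl
      set cl : Nat := (pvCell A n 1).toNat with hcldef
      have hcl : pvCell A n 1 = (cl : Int) := by omega
      have hcllen : cl < A.length := by omega
      simp only [hr, reduceIte, List.append_nil]
      rw [if_neg hl, if_neg hl]
      rw [show f + (1 + (1 + pvCost A cl + 0)) = ((f + 1) + pvCost A cl) + 1 by omega]
      simp only [pvOuterB, Bool.false_eq_true, if_false]
      rw [if_neg (by omega : ¬((n : Int) < 0))]
      rw [pvAt0 A n hn hP]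
      simp only [Option.bind_some]
      rw [pvAt1 A n hn hP]
      simp only [Option.bind_some]
      rw [if_pos (bne_iff_ne.mpr hl)]
      rw [hcl, ih cl hcllen (by omega) (f + 1) _ _]
      rw [show f + 1 = f + 0 + 1 by omega]
      simp only [pvOuterB, if_true]
      rw [pvAt2 A n hn hP]
      simp only [Option.bind_some, hr, bne_self_eq_false, Bool.false_eq_true, if_false]
      simp [pvStr, String.append_assoc]
    · -- two children
      obtain ⟨hcl1, hcl2, -⟩ := childL A hP n hn hl
      obtain ⟨hcr1, hcr2, -⟩ := childR A hP n hn hr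
      set cl : Nat := (pvCell A n 1).toNat with hcldef
      set cr : Nat := (pvCell A n 2).toNat with hcrdef
      have hcl : pvCell A n 1 = (cl : Int) := by omega
      have hcr : pvCell A n 2 = (cr : Int) := by omega
      have hcllen : cl < A.length := by omega
      have hcrlen : cr < A.length := by omega
      rw [if_neg hl, if_neg hl, if_neg hr, if_neg hr]
      rw [show f + (1 + (1 + pvCost A cl + pvCost A cr))
            = (((f + pvCost A cr) + 1) + pvCost A cl) + 1 by omega]
      simp only [pvOuterB, Bool.false_eq_true, if_false]
      rw [if_neg (by omega : ¬((n : Int) < 0))]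
      rw [pvAt0 A n hn hP]
      simp only [Option.bind_some]
      rw [pvAt1 A n hn hP]
      simp only [Option.bind_some]
      rw [if_pos (bne_iff_ne.mpr hl)]
      rw [hcl, ih cl hcllen (by omega) ((f + pvCost A cr) + 1) _ _]
      rw [show (f + pvCost A cr) + 1 = (f + pvCost A cr) + 1 from rfl]
      simp only [pvOuterB, if_true]
      rw [pvAt2 A n hn hP]
      simp only [Option.bind_some]
      rw [if_pos (bne_iff_ne.mpr hr)]
      rw [hcr, ih cr hcrlen (by omega) f st _]
      simp [pvStr, pvStr_append, String.append_assoc]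

theorem climb_any (A : List (List Int)) (hP : pvWf A) (n : Nat)
    (hn : n < A.length) (g : Nat) (hg : n + 2 ≤ g) :
    pvClimbA A g (n : Int) = pvClimbA A (A.length + 1) (n : Int) := by
  rw [show g = n + 2 + (g - n - 2) by omega, climb_fuel A hP n hn,
      show A.length + 1 = n + 2 + (A.length - 1 - n) by omega, climb_fuel A hP n hn]

-- ---- A's climbing walk also consumes exactly the preorder of the current subtree ----

theorem runA (A : List (List Int)) (hP : pvWf A) :
    ∀ d n, n < A.length → A.length - n ≤ d → ∀ (f : Nat) (res : String) (nx : Int),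
      pvClimbA A (A.length + 1) (n : Int) = some nx →
      pvOuterA A (f + (pvPre A n).length) (n : Int) res =
        pvOuterA A f nx (res ++ pvStr A (pvPre A n)) := by
  intro d
  induction d with
  | zero => intro n hn hd f res nx h; omega
  | succ d ih =>
    intro n hn hd f res nx hclimb
    rw [pre_unfold A hP n hn]
    by_cases hl : pvCell A n 1 = -1 <;> by_cases hr : pvCell A n 2 = -1
    · -- leaf: one visit, then the climb gives nx
      rw [if_pos hl, if_pos hr]
      simp only [List.append_nil, List.length_cons, List.length_nil, Nat.zero_add]
      simp only [pvOuterA]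
      rw [if_pos (show (n : Int) > -1 by omega)]
      rw [pvAt0 A n hn hP]
      simp only [Option.bind_some]
      rw [pvAt1 A n hn hP]
      simp only [Option.bind_some]
      rw [if_pos (beq_iff_eq.mpr hl)]
      rw [pvAt2 A n hn hP]
      simp only [Option.bind_some]
      rw [if_pos (beq_iff_eq.mpr hr), hclimb]
      simp only [Option.bind_some]
      simp [pvStr]
    · -- only a right child
      rw [if_pos hl, if_neg hr]
      obtain ⟨hc1, hc2, hpar⟩ := childR A hP n hn hr
      set cr : Nat := (pvCell A n 2).toNat with hcrdef
      have hcr : pvCell A n 2 = (cr : Int) := by omega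
      have hcrlen : cr < A.length := by omega
      simp only [List.nil_append, List.length_cons]
      rw [show f + ((pvPre A cr).length + 1) = (f + (pvPre A cr).length) + 1 by omega]
      simp only [pvOuterA]
      rw [if_pos (show (n : Int) > -1 by omega)]
      rw [pvAt0 A n hn hP]
      simp only [Option.bind_some]
      rw [pvAt1 A n hn hP]
      simp only [Option.bind_some]
      rw [if_pos (beq_iff_eq.mpr hl)]
      rw [pvAt2 A n hn hP]
      simp only [Option.bind_some]
      rw [if_neg (by simp [hr])]
      have hclimbr : pvClimbA A (A.length + 1) (cr : Int) = some nx := by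
        rw [climb_big A hP cr hcrlen, climb_at A hP cr n hcrlen hn hpar (cr + 1),
            if_pos (by simp [hcr]), climb_any A hP n hn (cr + 1) (by omega), hclimb]
      rw [hcr, ih cr hcrlen (by omega) f _ nx hclimbr]
      simp [pvStr, String.append_assoc]
    · -- only a left child
      rw [if_neg hl, if_pos hr]
      obtain ⟨hc1, hc2, hpar⟩ := childL A hP n hn hl
      set cl : Nat := (pvCell A n 1).toNat with hcldef
      have hcl : pvCell A n 1 = (cl : Int) := by omega
      have hcllen : cl < A.length := by omega
      simp only [List.append_nil, List.length_cons]
      rw [show f + ((pvPre A cl).length + 1) = (f + (pvPre A cl).length) + 1 by omega]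
      simp only [pvOuterA]
      rw [if_pos (show (n : Int) > -1 by omega)]
      rw [pvAt0 A n hn hP]
      simp only [Option.bind_some]
      rw [pvAt1 A n hn hP]
      simp only [Option.bind_some]
      rw [if_neg (by simp [hl])]
      have hclimbl : pvClimbA A (A.length + 1) (cl : Int) = some nx := by
        rw [climb_big A hP cl hcllen, climb_at A hP cl n hcllen hn hpar (cl + 1),
            if_pos (by simp [hcl, hr]), climb_any A hP n hn (cl + 1) (by omega), hclimb]
      rw [hcl, ih cl hcllen (by omega) f _ nx hclimbl]
      simp [pvStr, String.append_assoc]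
    · -- two children
      rw [if_neg hl, if_neg hr]
      obtain ⟨hcl1, hcl2, hparl⟩ := childL A hP n hn hl
      obtain ⟨hcr1, hcr2, hparr⟩ := childR A hP n hn hr
      set cl : Nat := (pvCell A n 1).toNat with hcldef
      set cr : Nat := (pvCell A n 2).toNat with hcrdef
      have hcl : pvCell A n 1 = (cl : Int) := by omega
      have hcr : pvCell A n 2 = (cr : Int) := by omega
      have hcllen : cl < A.length := by omega
      have hcrlen : cr < A.length := by omega
      have hne2 : pvCell A n 2 ≠ pvCell A n 1 := fun h => hl (childNe A hP n hn h.symm)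
      simp only [List.length_cons, List.length_append]
      rw [show f + ((pvPre A cl).length + (pvPre A cr).length + 1)
            = ((f + (pvPre A cr).length) + (pvPre A cl).length) + 1 by omega]
      simp only [pvOuterA]
      rw [if_pos (show (n : Int) > -1 by omega)]
      rw [pvAt0 A n hn hP]
      simp only [Option.bind_some]
      rw [pvAt1 A n hn hP]
      simp only [Option.bind_some]
      rw [if_neg (by simp [hl])]
      have hclimbl : pvClimbA A (A.length + 1) (cl : Int) = some (cr : Int) := by
        rw [climb_big A hP cl hcllen, climb_at A hP cl n hcllen hn hparl (cl + 1),
            if_neg (by simp [beq_iff_eq, ← hcl, hr, hne2]), hcr]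
      have hclimbr : pvClimbA A (A.length + 1) (cr : Int) = some nx := by
        rw [climb_big A hP cr hcrlen, climb_at A hP cr n hcrlen hn hparr (cr + 1),
            if_pos (by simp [hcr]), climb_any A hP n hn (cr + 1) (by omega), hclimb]
      rw [hcl, ih cl hcllen (by omega) (f + (pvPre A cr).length) _ _ hclimbl]
      rw [ih cr hcrlen (by omega) f _ nx hclimbr]
      simp [pvStr, pvStr_append, String.append_assoc]

-- ---- the degenerate families pvTriv / pvDie: both programs print exactly the root ----

theorem pvAt_row (A : List (List Int)) (q j : Nat) (hql : q < A.length)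
    (hj : j < (A.getD q []).length) (i : Int)
    (hi : PySem.List.pyGet? A i = some (A.getD q [])) :
    pvAt A i (j : Int) = some (pvCell A q j) := by
  unfold pvAt pvCell
  rw [hi]
  simp only [Option.bind_some, PySem.List.pyGet?_natCast]
  have hrow : A.getD q [] = A[q] := List.getD_eq_getElem _ _ hql
  have hj' : j < A[q].length := by rw [← hrow]; omega
  rw [List.getD_eq_getElem _ _ hql, List.getElem?_eq_getElem hj', List.getD_eq_getElem _ _ hj']

theorem triv_eq (A : List (List Int)) (hT : pvTriv A) :
    affichagePrefixe A = affichagePrefixe_alt A := by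
  obtain ⟨hne, h40, hl, hr, hp1, hp2, h3q, hq1, hq2⟩ := hT
  have hlen : 0 < A.length := List.length_pos_iff.mpr hne
  have hqlt : pvQ A < A.length := by unfold pvQ; split <;> omega
  have hA00 : pvAt A 0 0 = some (pvCell A 0 0) := by simpa using pvAt_nat A 0 0 hlen (by omega)
  have hA01 : pvAt A 0 1 = some (pvCell A 0 1) := by simpa using pvAt_nat A 0 1 hlen (by omega)
  have hA02 : pvAt A 0 2 = some (pvCell A 0 2) := by simpa using pvAt_nat A 0 2 hlen (by omega)
  have hA03 : pvAt A 0 3 = some (pvCell A 0 3) := by simpa using pvAt_nat A 0 3 hlen (by omega)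
  have hiq : PySem.List.pyGet? A (pvCell A 0 3) = some (A.getD (pvQ A) []) := by
    by_cases hneg : pvCell A 0 3 < 0
    · rw [show pvCell A 0 3 = -(((-(pvCell A 0 3)).toNat : Nat) : Int) by omega,
          PySem.List.pyGet?_neg_natCast A (-(pvCell A 0 3)).toNat (by omega) (by omega)]
      have hqe : A.length - (-(pvCell A 0 3)).toNat = pvQ A := by unfold pvQ; split <;> omega
      rw [hqe, List.getElem?_eq_getElem hqlt, List.getD_eq_getElem _ _ hqlt]
    · rw [show pvCell A 0 3 = (((pvCell A 0 3).toNat : Nat) : Int) by omega,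
          PySem.List.pyGet?_natCast]
      have hqe : (pvCell A 0 3).toNat = pvQ A := by unfold pvQ; split <;> omega
      rw [hqe, List.getElem?_eq_getElem hqlt, List.getD_eq_getElem _ _ hqlt]
  have hAq1 : pvAt A (pvCell A 0 3) 1 = some (pvCell A (pvQ A) 1) := by
    simpa using pvAt_row A (pvQ A) 1 hqlt (by omega) _ hiq
  have hAq2 : pvAt A (pvCell A 0 3) 2 = some (pvCell A (pvQ A) 2) := by
    simpa using pvAt_row A (pvQ A) 2 hqlt (by omega) _ hiq
  unfold affichagePrefixe affichagePrefixe_alt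
  simp only [pvOuterA, pvOuterB]
  rw [if_pos (by omega : (0 : Int) > -1), hA00, hA01, hA02]
  simp only [Option.bind_some]
  rw [hl, hr]
  norm_num
  simp only [pvClimbA]
  rw [hA03]
  simp only [Option.bind_some]
  rw [hAq1, hAq2]
  simp only [Option.bind_some]
  rw [hq2, if_neg (by simp [hq1])]
  simp only [Option.bind_some]
  rw [show (2 : Nat) ^ A.length = (2 ^ A.length - 1) + 1 by
        have := Nat.one_le_two_pow (n := A.length); omega]
  simp only [pvOuterA]
  rw [if_neg (by omega : ¬((-1 : Int) > -1)), outerB_nil]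

theorem die_eq (A : List (List Int)) (hD : pvDie A) :
    affichagePrefixe A = affichagePrefixe_alt A := by
  obtain ⟨hne, hcase⟩ := hD
  have hlen : 0 < A.length := List.length_pos_iff.mpr hne
  unfold affichagePrefixe affichagePrefixe_alt
  simp only [pvOuterA, pvOuterB]
  rcases hcase with ⟨h2, hl⟩ | ⟨h3, hl, hr⟩
  · -- row 0's left pointer is < -1: both print the root and stop
    have hA00 : pvAt A 0 0 = some (pvCell A 0 0) := by simpa using pvAt_nat A 0 0 hlen (by omega)
    have hA01 : pvAt A 0 1 = some (pvCell A 0 1) := by simpa using pvAt_nat A 0 1 hlen (by omega)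
    rw [if_pos (by omega : (0 : Int) > -1), hA00, hA01]
    simp only [Option.bind_some]
    rw [if_neg (by simp only [beq_iff_eq]; omega :
          ¬((pvCell A 0 1 == (-1 : Int)) = true))]
    rw [if_pos (bne_iff_ne.mpr (by omega : pvCell A 0 1 ≠ -1))]
    rw [show (2 : Nat) ^ A.length = (2 ^ A.length - 1) + 1 by
          have := Nat.one_le_two_pow (n := A.length); omega]
    rw [show (2 : Nat) ^ (A.length + 1) = (2 ^ (A.length + 1) - 1) + 1 by
          have := Nat.one_le_two_pow (n := A.length + 1); omega]
    simp only [pvOuterA, pvOuterB, Bool.false_eq_true, if_false]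
    rw [if_neg (by omega : ¬(pvCell A 0 1 > -1)), if_pos (by omega : pvCell A 0 1 < 0)]
    norm_num
  · -- row 0: left = -1, right pointer < -1: both print the root and stop
    have hA00 : pvAt A 0 0 = some (pvCell A 0 0) := by simpa using pvAt_nat A 0 0 hlen (by omega)
    have hA01 : pvAt A 0 1 = some (pvCell A 0 1) := by simpa using pvAt_nat A 0 1 hlen (by omega)
    have hA02 : pvAt A 0 2 = some (pvCell A 0 2) := by simpa using pvAt_nat A 0 2 hlen (by omega)
    rw [if_pos (by omega : (0 : Int) > -1), hA00, hA01, hA02]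
    simp only [Option.bind_some]
    rw [hl]
    norm_num
    rw [if_neg (by omega : ¬(pvCell A 0 2 = -1)), if_neg (by omega : ¬(pvCell A 0 2 = -1))]
    rw [show (2 : Nat) ^ A.length = (2 ^ A.length - 1) + 1 by
          have := Nat.one_le_two_pow (n := A.length); omega]
    rw [show (2 : Nat) ^ (A.length + 1) = (2 ^ (A.length + 1) - 1) + 1 by
          have := Nat.one_le_two_pow (n := A.length + 1); omega]
    simp only [pvOuterA, pvOuterB, Bool.false_eq_true, if_false]
    rw [if_neg (by omega : ¬(pvCell A 0 2 > -1)), if_pos (by omega : pvCell A 0 2 < 0)]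

theorem affichagePrefixe_spec : Claim_equal_affichagePrefixe := by
  unfold Claim_equal_affichagePrefixe
  intro A hDom hPre
  unfold Spec_affichagePrefixe
  rcases hPre with hP | hT | hD
  case inr.inl => exact triv_eq A hT
  case inr.inr => exact die_eq A hD
  unfold affichagePrefixe affichagePrefixe_alt
  have hlen : 0 < A.length := List.length_pos_iff.mpr hP.1
  have hclimb0 : pvClimbA A (A.length + 1) ((0 : Nat) : Int) = some (-1) := by
    rw [climb_big A hP 0 hlen]
    simpa using climb_root A hP 1
  have hLb : (pvPre A 0).length + 1 ≤ 2 ^ A.length := by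
    simpa using pre_len A hP A.length 0 hlen (by omega)
  have hCb : pvCost A 0 + 2 ≤ 2 ^ (A.length + 1) := by
    simpa using cost_le A hP A.length 0 hlen (by omega)
  set L := (pvPre A 0).length with hLdef
  set C := pvCost A 0 with hCdef
  rw [show 2 ^ A.length + 1 = (2 ^ A.length + 1 - L) + L by omega]
  have hrA := runA A hP A.length 0 hlen (by omega) (2 ^ A.length + 1 - L) "" (-1) hclimb0
  simp only [Nat.cast_zero] at hrA
  rw [hrA]
  rw [show 2 ^ (A.length + 1) + 1 = (2 ^ (A.length + 1) + 1 - C) + C by omega]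
  have hrB := runB A hP A.length 0 hlen (by omega) (2 ^ (A.length + 1) + 1 - C) [] ""
  simp only [Nat.cast_zero] at hrB
  rw [hrB, outerB_nil]
  rw [show 2 ^ A.length + 1 - L = (2 ^ A.length - L) + 1 by omega]
  simp only [pvOuterA]
  rw [if_neg (by omega : ¬((-1 : Int) > -1))]
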